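-- pv_equiv track=rewrite | github.com/frenzymadness/RH-devconf2018-challenge | tests.py | is_players_die_better
-- ===== SOURCE A (Python) =====
-- def is_players_die_better(player, enemy):
--     total_wins = 0
--     for p in player:
--         for e in enemy:
--             if p > e:
--                 total_wins += 1
--             elif p < e:
--                 total_wins -= 1
--     return total_wins > 0
-- ===== SOURCE B (Python) =====
-- def _bisect_left(a, x):
--     # standard-library bisect.bisect_left (hand-written only because A imports nothing)
--     lo, hi = 0, len(a)
--     while lo < hi:
--         mid = (lo + hi) // 2
--         if a[mid] < x:
--             lo = mid + 1
--         else: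
--             hi = mid
--     return lo
--
--
-- def _bisect_right(a, x):
--     # standard-library bisect.bisect_right (hand-written only because A imports nothing)
--     lo, hi = 0, len(a)
--     while lo < hi:
--         mid = (lo + hi) // 2
--         if x < a[mid]:
--             hi = mid
--         else:
--             lo = mid + 1
--     return lo
--
--
-- def is_players_die_better(player, enemy):
--     es = sorted(enemy)
--     n = len(es)
--     score = 0
--     for p in player:
--         lo = _bisect_left(es, p)
--         hi = _bisect_right(es, p)
--         score += lo - (n - hi)
--     return score > 0
-- ===== Notes on version B (the rewrite author's own statement) =====
-- stated objective: faster
-- what changed: Replaces the nested all-pairs comparison loop by sorting the enemy list once and, for each player value, counting smaller/greater enemy values with two binary searches (bisect_left/bisect_right).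
import Mathlib
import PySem

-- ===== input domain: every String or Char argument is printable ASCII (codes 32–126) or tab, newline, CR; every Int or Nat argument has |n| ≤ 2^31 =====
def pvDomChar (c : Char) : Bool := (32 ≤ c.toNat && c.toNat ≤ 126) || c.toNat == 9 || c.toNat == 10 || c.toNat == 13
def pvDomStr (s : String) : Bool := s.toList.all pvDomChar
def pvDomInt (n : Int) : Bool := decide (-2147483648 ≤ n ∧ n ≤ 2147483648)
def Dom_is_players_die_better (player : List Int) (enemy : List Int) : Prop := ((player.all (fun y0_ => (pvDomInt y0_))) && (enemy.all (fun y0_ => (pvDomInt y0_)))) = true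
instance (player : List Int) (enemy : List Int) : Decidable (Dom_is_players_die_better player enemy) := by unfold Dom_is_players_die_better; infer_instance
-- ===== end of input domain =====

-- B replaces A's all-pairs double loop by sorting enemy once and counting, per player
-- value, the smaller/greater enemy values with two binary searches (objective: faster).

-- ===== PORT A =====
def is_players_die_better (player : List Int) (enemy : List Int) : Bool :=
  let total_wins : Int :=
    player.foldl (fun tw p =>
      enemy.foldl (fun tw e =>
        if p > e then tw + 1
        else if p < e then tw - 1
        else tw) tw) 0
  decide (total_wins > 0)

-- ===== PORT B =====
-- Source B's _bisect_left/_bisect_right are verbatim the standard library's bisect_left /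
-- bisect_right (hand-written there only because A imports nothing); they are ported as
-- the PySem primitives PySem.List.bisectLeft / bisectRight, which are that same loop.
def is_players_die_better_alt (player : List Int) (enemy : List Int) : Bool :=
  let es := PySem.List.sorted enemy (fun x => x) false
  let n : Int := es.length
  let score : Int :=
    player.foldl (fun sc p =>
      let lo : Int := PySem.List.bisectLeft es p
      let hi : Int := PySem.List.bisectRight es p
      sc + (lo - (n - hi))) 0
  decide (score > 0)

-- ===== PRECONDITION & SPEC =====
def Spec_is_players_die_better (player : List Int) (enemy : List Int) (out : Bool) : Prop := out = is_players_die_better_alt player enemy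
instance (player : List Int) (enemy : List Int) (out : Bool) : Decidable (Spec_is_players_die_better player enemy out) := by unfold Spec_is_players_die_better; infer_instance

-- ===== CLAIM (what is proved, stated in full; the proofs are below) =====
def Claim_equal_is_players_die_better : Prop := ∀ (player : List Int) (enemy : List Int), Dom_is_players_die_better player enemy → Spec_is_players_die_better player enemy (is_players_die_better player enemy)

-- ===== LEMMAS AND PROOFS =====

-- counting: if membership of the predicate is exactly "index < k", countP is k
theorem pv_countP_eq_of_iff (P : Int → Bool) (es : List Int) (k : Nat)
    (hk : k ≤ es.length) (h : ∀ i (hi : i < es.length), P es[i] = true ↔ i < k) :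
    es.countP P = k := by
  induction es generalizing k with
  | nil => simpa using (hk.antisymm (Nat.zero_le k)).symm
  | cons a t ih =>
    cases k with
    | zero =>
      have ha : ¬ P a = true := by
        have := h 0 (by simp); simpa using this
      have ht : t.countP P = 0 := by
        apply ih 0 (Nat.zero_le _)
        intro i hi
        have := h (i + 1) (by simpa using Nat.succ_lt_succ hi)
        simpa using this
      simp [ha, ht]
    | succ k' =>
      have ha : P a = true := by
        have := h 0 (by simp); simpa using this
      have ht : t.countP P = k' := by
        apply ih k' (by simpa using hk)
        intro i hi
        have := h (i + 1) (by simpa using Nat.succ_lt_succ hi)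
        simpa [Nat.succ_lt_succ_iff] using this
      simp [ha, ht]

-- bisect_left on a sorted list counts the elements strictly below p
theorem pv_bisectLeft_countP (es : List Int) (p : Int)
    (hs : es.Pairwise (· ≤ ·)) :
    PySem.List.bisectLeft es p = es.countP (fun e => e < p) := by
  obtain ⟨hle, hlt, hge⟩ := PySem.List.bisectLeft_spec es p hs
  refine (pv_countP_eq_of_iff _ es _ hle ?_).symm
  intro i hi
  constructor
  · intro hP
    by_contra hnot
    have := hge i hi (Nat.le_of_not_lt hnot)
    simp at hP
    omega
  · intro hik
    simpa using hlt i hi hik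

-- bisect_right on a sorted list counts the elements ≤ p
theorem pv_bisectRight_countP (es : List Int) (p : Int)
    (hs : es.Pairwise (· ≤ ·)) :
    PySem.List.bisectRight es p = es.countP (fun e => e ≤ p) := by
  obtain ⟨hle, hlt, hge⟩ := PySem.List.bisectRight_spec es p hs
  refine (pv_countP_eq_of_iff _ es _ hle ?_).symm
  intro i hi
  constructor
  · intro hP
    by_contra hnot
    have := hge i hi (Nat.le_of_not_lt hnot)
    simp at hP
    omega
  · intro hik
    simpa using hlt i hi hik

-- A's inner loop adds (#enemy < p) - (#enemy > p) to the accumulator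
theorem pv_inner_loop (enemy : List Int) (p : Int) (t : Int) :
    enemy.foldl (fun tw e =>
        if p > e then tw + 1 else if p < e then tw - 1 else tw) t
      = t + ((enemy.countP (fun e => e < p) : Int)
             - (enemy.countP (fun e => p < e) : Int)) := by
  induction enemy generalizing t with
  | nil => simp
  | cons a rest ih =>
    by_cases h1 : a < p
    · simp [List.foldl_cons, List.countP_cons, h1, not_lt_of_gt h1, ih]
      push_cast
      ring
    · by_cases h2 : p < a
      · simp [List.foldl_cons, h2, not_lt_of_gt h2, ih]
        ring
      · simp [List.foldl_cons, h1, h2, ih]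

-- the two accumulating folds over player agree
theorem pv_folds_eq (player : List Int) (enemy : List Int) (t : Int) :
    player.foldl (fun tw p =>
      enemy.foldl (fun tw e =>
        if p > e then tw + 1 else if p < e then tw - 1 else tw) tw) t
    = player.foldl (fun sc p =>
        sc + ((PySem.List.bisectLeft (PySem.List.sorted enemy (fun x => x) false) p : Int)
          - (((PySem.List.sorted enemy (fun x => x) false).length : Int)
             - (PySem.List.bisectRight (PySem.List.sorted enemy (fun x => x) false) p : Int)))) t := by
  induction player generalizing t with
  | nil => rfl
  | cons p rest ih =>
    have hs : (PySem.List.sorted enemy (fun x => x) false).Pairwise (· ≤ ·) :=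
      PySem.List.sorted_pairwise enemy (fun x => x)
    have hperm := PySem.List.sorted_perm enemy (fun x => x) false
    have hlt : (PySem.List.sorted enemy (fun x => x) false).countP (fun e => e < p)
        = enemy.countP (fun e => e < p) := hperm.countP_eq _
    have hle : (PySem.List.sorted enemy (fun x => x) false).countP (fun e => e ≤ p)
        = enemy.countP (fun e => e ≤ p) := hperm.countP_eq _
    have hlen : (PySem.List.sorted enemy (fun x => x) false).length = enemy.length :=
      hperm.length_eq
    have hsplit : enemy.countP (fun e => e ≤ p) + enemy.countP (fun e => p < e)
        = enemy.length := by
      rw [List.length_eq_countP_add_countP (l := enemy) (p := fun e => decide (e ≤ p))]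
      congr 1
      apply List.countP_congr
      intro x _
      simp
    simp only [List.foldl_cons]
    rw [pv_inner_loop, ih]
    congr 1
    rw [pv_bisectLeft_countP _ _ hs, pv_bisectRight_countP _ _ hs, hlt, hle, hlen]
    omega

-- ===== VERDICT (by name: the statement is the Claim_ definition above) =====
theorem is_players_die_better_spec : Claim_equal_is_players_die_better := by
  intro player enemy _
  unfold Spec_is_players_die_better is_players_die_better is_players_die_better_alt
  simp only []
  rw [pv_folds_eq]
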